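-- pv_equiv track=rewrite | github.com/opencoca/VIDEO-vidsum | code/vtt_to_srt.py | srt_segment_reduce
-- ===== SOURCE A (Python) =====
-- def srt_segment_reduce(lines):
--     """ Reduce the number srt segments
--
--     Args:
--         lines: an aray of Srt segments
--
--     Returns:
--         str: cleaned str
--     """
--
--     i = 0
--     while i < len(lines):
--         if i+1 < len(lines):
--             if lines[i].startswith("00:0") and lines[i+1].startswith("00:0"):
--                 lines[i] = lines[i].split("-->")[0] + " --> " + lines[i+1].split("-->")[-1]
--                 lines.pop(i+1)
--
--                 i -= 1
--         i += 1
--     #import pdb; pdb.set_trace()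
--     return lines
-- ===== SOURCE B (Python) =====
-- def srt_segment_reduce(lines):
--     """Single forward pass: fold each line into `out`, merging it into the
--     previous output entry when both are "00:0" timestamp lines."""
--     out = []
--     for line in lines:
--         if out and out[-1].startswith("00:0") and line.startswith("00:0"):
--             out[-1] = out[-1].split("-->")[0] + " --> " + line.split("-->")[-1]
--         else:
--             out.append(line)
--     return out
-- ===== Notes on version B (the rewrite author's own statement) =====
-- stated objective: faster
-- what changed: Replaces the in-place while loop with index rewinding and O(n) list.pop calls by a single forward fold that builds a new output list, merging each timestamp line into the last output entry.
import Mathlib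
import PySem

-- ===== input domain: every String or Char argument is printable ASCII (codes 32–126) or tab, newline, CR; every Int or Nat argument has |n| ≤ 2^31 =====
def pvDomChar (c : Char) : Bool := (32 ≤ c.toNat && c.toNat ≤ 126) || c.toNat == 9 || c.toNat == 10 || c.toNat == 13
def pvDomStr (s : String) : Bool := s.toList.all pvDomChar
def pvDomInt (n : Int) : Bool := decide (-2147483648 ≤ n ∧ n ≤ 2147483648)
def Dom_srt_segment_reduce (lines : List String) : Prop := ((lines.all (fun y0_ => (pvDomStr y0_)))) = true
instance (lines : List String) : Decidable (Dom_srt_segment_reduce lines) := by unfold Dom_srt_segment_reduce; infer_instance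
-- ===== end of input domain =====

-- B replaces A's in-place while loop (pop + index rewind) by one forward fold building a
-- new list; A mutates its argument in place, so the equivalence proved here is about the
-- RETURN value only.

-- ===== PORT A =====
-- lines[i].split("-->")[0] + " --> " + lines[i+1].split("-->")[-1]  (the same expression
-- occurs in both Pythons); split("-->") is never empty, so [0]/[-1] are headD/getLastD
def pvMerge (x y : String) : String :=
  ((PySem.Str.split? x "-->").getD []).headD "" ++ " --> " ++
    ((PySem.Str.split? y "-->").getD []).getLastD ""

-- the while loop of A; state = (lines, i); 'lines[i] = …; lines.pop(i+1)' is set + eraseIdx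
-- (indices are in range by the branch guards); 'i -= 1; i += 1' leaves i unchanged.
def loopA (lines : List String) (i : Nat) : List String :=
  if h : i < lines.length then
    if h2 : i + 1 < lines.length then
      if PySem.Str.startswith (lines.getD i "") "00:0" &&
         PySem.Str.startswith (lines.getD (i+1) "") "00:0" then
        loopA ((lines.set i (pvMerge (lines.getD i "") (lines.getD (i+1) ""))).eraseIdx (i+1)) i
      else
        loopA lines (i+1)
    else
      loopA lines (i+1)
  else
    lines
termination_by 2 * lines.length - i
decreasing_by
  all_goals first
    | omega
    | (simp [List.length_eraseIdx, List.length_set]; split <;> omega)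

def srt_segment_reduce (lines : List String) : List String := loopA lines 0

-- ===== PORT B =====
-- the loop body of Source B; out is kept reversed (out[-1] = head), reversed once at the end
def altStep (out : List String) (line : String) : List String :=
  match out with
  | last :: rest =>
      if PySem.Str.startswith last "00:0" && PySem.Str.startswith line "00:0" then
        pvMerge last line :: rest
      else
        line :: last :: rest
  | [] => [line]

def srt_segment_reduce_alt (lines : List String) : List String :=
  (lines.foldl altStep []).reverse

-- ===== PRECONDITION & SPEC =====
def Spec_srt_segment_reduce (lines : List String) (out : List String) : Prop := out = srt_segment_reduce_alt lines
instance (lines : List String) (out : List String) : Decidable (Spec_srt_segment_reduce lines out) := by unfold Spec_srt_segment_reduce; infer_instance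

-- ===== CLAIM (what is proved, stated in full; the proofs are below) =====
def Claim_equal_srt_segment_reduce : Prop := ∀ (lines : List String), Dom_srt_segment_reduce lines → Spec_srt_segment_reduce lines (srt_segment_reduce lines)

-- ===== LEMMAS AND PROOFS =====

-- common reduction of both loops: merge the first mergeable adjacent pair, recurse
def red : List String → List String
  | [] => []
  | [x] => [x]
  | x :: y :: t =>
      if PySem.Str.startswith x "00:0" && PySem.Str.startswith y "00:0" then
        red (pvMerge x y :: t)
      else
        x :: red (y :: t)
termination_by l => l.length

theorem red_nil : red [] = [] := by simp [red]
theorem red_single (x : String) : red [x] = [x] := by simp [red]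
theorem red_cons_cons (x y : String) (t : List String) :
    red (x :: y :: t) =
      if PySem.Str.startswith x "00:0" && PySem.Str.startswith y "00:0" then
        red (pvMerge x y :: t)
      else
        x :: red (y :: t) := by
  rw [red]

theorem set_eraseIdx_succ (l : List String) (i : Nat) (m : String) (h : i + 1 < l.length) :
    (l.set i m).eraseIdx (i+1) = l.take i ++ m :: l.drop (i+2) := by
  rw [List.set_eq_take_append_cons_drop, if_pos (show i < l.length by omega)]
  rw [List.eraseIdx_append_of_length_le (by simp only [List.length_take]; omega)]
  have h1 : i + 1 - (l.take i).length = 1 := by simp only [List.length_take]; omega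
  rw [h1]
  simp [List.tail_drop]

theorem loopA_eq_red (lines : List String) (i : Nat) :
    loopA lines i = lines.take i ++ red (lines.drop i) := by
  rw [loopA]
  by_cases h : i < lines.length
  · simp only [h, dif_pos]
    by_cases h2 : i + 1 < lines.length
    · simp only [h2, dif_pos]
      have hd : lines.drop i = lines[i] :: lines[i+1] :: lines.drop (i+2) := by
        rw [List.drop_eq_getElem_cons h]
        congr 1
        rw [List.drop_eq_getElem_cons h2]
      have hgi : lines.getD i "" = lines[i] := by
        simp [List.getD_eq_getElem?_getD, List.getElem?_eq_getElem h]
      have hgi1 : lines.getD (i+1) "" = lines[i+1] := by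
        simp [List.getD_eq_getElem?_getD, List.getElem?_eq_getElem h2]
      by_cases hc : PySem.Str.startswith lines[i] "00:0" && PySem.Str.startswith lines[i+1] "00:0"
      · rw [hgi, hgi1, if_pos hc]
        rw [loopA_eq_red, set_eraseIdx_succ _ _ _ h2]
        have hL : (lines.take i).length = i := by simp only [List.length_take]; omega
        rw [List.take_left' hL, List.drop_left' hL]
        rw [hd, red_cons_cons, if_pos hc]
      · rw [hgi, hgi1, if_neg hc]
        rw [loopA_eq_red]
        rw [hd, red_cons_cons, if_neg hc]
        rw [List.take_add_one, List.getElem?_eq_getElem h, Option.toList_some,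
            List.append_assoc, List.singleton_append, List.drop_eq_getElem_cons h2]
    · simp only [h2, dif_neg, not_false_iff]
      rw [loopA_eq_red]
      have hnil : lines.drop (i+1) = [] := List.drop_eq_nil_of_le (by omega)
      have hone : lines.drop i = [lines[i]] := by
        rw [List.drop_eq_getElem_cons h, hnil]
      rw [hnil, hone, red_single, red_nil, List.append_nil]
      rw [List.take_add_one, List.getElem?_eq_getElem h, Option.toList_some]
  · simp only [h, dif_neg, not_false_iff]
    have : lines.drop i = [] := List.drop_eq_nil_of_le (by omega)
    rw [this, red_nil, List.append_nil, List.take_of_length_le (by omega)]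
termination_by 2 * lines.length - i
decreasing_by
  all_goals first
    | omega
    | (simp [List.length_eraseIdx, List.length_set]; split <;> omega)

theorem foldl_altStep_eq_red (rest : List String) (x : String) (racc : List String) :
    List.foldl altStep (x :: racc) rest = (red (x :: rest)).reverse ++ racc := by
  match rest with
  | [] => simp [red_single]
  | y :: t =>
      rw [List.foldl_cons]
      show List.foldl altStep (altStep (x :: racc) y) t = _
      rw [red_cons_cons]
      by_cases hc : PySem.Str.startswith x "00:0" && PySem.Str.startswith y "00:0"
      · simp only [altStep, hc, if_pos]
        rw [foldl_altStep_eq_red]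
      · simp only [altStep, hc, if_neg, Bool.not_eq_true]
        rw [foldl_altStep_eq_red t y (x :: racc)]
        simp
termination_by rest.length

-- ===== VERDICT (by name: the statement is the Claim_ definition above) =====
theorem srt_segment_reduce_spec : Claim_equal_srt_segment_reduce := by
  intro lines _
  unfold Spec_srt_segment_reduce srt_segment_reduce srt_segment_reduce_alt
  rw [loopA_eq_red]
  match lines with
  | [] => simp [red_nil]
  | x :: rest =>
      rw [List.foldl_cons]
      show _ = (List.foldl altStep (altStep [] x) rest).reverse
      rw [show altStep [] x = [x] from rfl]
      rw [foldl_altStep_eq_red rest x []]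
      simp
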